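-- pv_equiv track=rewrite | github.com/smoksde/circuits | software_beame.py | theorem_4_2_precompute_lookup_powers
-- ===== SOURCE A (Python) =====
-- import math
--
-- def theorem_4_2_precompute_lookup_powers(n: int):
--     result = []
--     for p in range(1, n + 1):
--         powers_of_p = []
--         for e in range(n):
--             if e > math.log2(n) or p**e > n:
--                 # power is larger than n, just fill with 0
--                 power = 0
--             else:
--                 power = p**e
--             powers_of_p.append(power)
--         result.append(powers_of_p)
--     return result
-- ===== SOURCE B (Python) =====
-- def theorem_4_2_precompute_lookup_powers(n: int):
--     if n < 1:
--         return []
--     L = n.bit_length() - 1  # floor(log2(n)), exact integer replacement for the float comparison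
--
--     def row(p):
--         out = []
--         power, e = 1, 0
--         while e <= L and power <= n:
--             out.append(power)
--             power *= p
--             e += 1
--         out.extend([0] * (n - e))
--         return out
--
--     return [row(p) for p in range(1, n + 1)]
-- ===== Notes on version B (the rewrite author's own statement) =====
-- stated objective: alternative
-- what changed: B replaces A's per-cell recompute of p**e and math.log2(n) with an incremental per-row while loop that multiplies a running power (using an exact integer floor-log2 via bit_length) and then bulk-pads the rest of the row with zeros.
import Mathlib
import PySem

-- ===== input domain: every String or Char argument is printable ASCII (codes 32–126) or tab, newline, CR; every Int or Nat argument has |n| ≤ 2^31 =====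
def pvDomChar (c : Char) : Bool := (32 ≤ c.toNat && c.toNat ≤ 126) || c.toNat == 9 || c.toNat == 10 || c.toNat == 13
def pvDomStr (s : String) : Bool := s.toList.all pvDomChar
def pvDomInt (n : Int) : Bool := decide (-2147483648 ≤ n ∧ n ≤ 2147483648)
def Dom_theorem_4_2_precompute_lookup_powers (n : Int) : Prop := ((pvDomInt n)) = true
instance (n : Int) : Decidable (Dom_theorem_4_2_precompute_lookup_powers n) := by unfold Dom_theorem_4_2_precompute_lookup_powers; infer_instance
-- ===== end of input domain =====

-- B builds each row incrementally with a running power and pads the tail with zeros,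
-- instead of A's per-cell recompute of p**e and log2(n); objective: alternative.


-- ===== PORT A =====
-- 'e > math.log2(n)' is ported as the integer comparison 'e > Nat.log 2 n.toNat': exact on the
-- domain, since log2 is only evaluated when n ≥ 1 (both loops are empty otherwise) and for
-- 1 ≤ n ≤ 2^31 the float log2(n) rounds to an integer only when n is a power of 2, so the
-- float comparison against the int e coincides with comparing against floor(log2 n).
-- 'p**e' has e ≥ 0 (e from range(n)), ported as p ^ e.toNat.
def theorem_4_2_precompute_lookup_powers (n : Int) : List (List Int) :=
  (PySem.List.pyRange 1 (n + 1) 1).foldl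
    (fun result p =>
      result ++
        [(PySem.List.pyRange 0 n 1).foldl
          (fun powers_of_p e =>
            powers_of_p ++
              [if e > (Nat.log 2 n.toNat : Int) ∨ p ^ e.toNat > n then 0 else p ^ e.toNat])
          []])
    []

-- ===== PORT B =====
-- the while loop of B's row builder, with fuel (L+1 suffices: e increments every iteration);
-- when the loop stops (or fuel runs out, at which point e = L+1 > L anyway) it pads n - e zeros.
def pvRowAux (n L p : Int) (power e : Int) : Nat → List Int
  | 0 => List.replicate (n - e).toNat 0
  | fuel + 1 =>
    if e ≤ L ∧ power ≤ n then power :: pvRowAux n L p (power * p) (e + 1) fuel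
    else List.replicate (n - e).toNat 0

-- 'n.bit_length() - 1' for n ≥ 1 = floor(log2 n) = Nat.log 2 n.toNat (exact integer arithmetic)
def theorem_4_2_precompute_lookup_powers_alt (n : Int) : List (List Int) :=
  if n < 1 then []
  else
    let L : Int := (Nat.log 2 n.toNat : Int)
    (PySem.List.pyRange 1 (n + 1) 1).map (fun p => pvRowAux n L p 1 0 (L + 1).toNat)

-- ===== PRECONDITION & SPEC =====
def Spec_theorem_4_2_precompute_lookup_powers (n : Int) (out : List (List Int)) : Prop := out = theorem_4_2_precompute_lookup_powers_alt n
instance (n : Int) (out : List (List Int)) : Decidable (Spec_theorem_4_2_precompute_lookup_powers n out) := by unfold Spec_theorem_4_2_precompute_lookup_powers; infer_instance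

-- ===== CLAIM (what is proved, stated in full; the proofs are below) =====
def Claim_equal_theorem_4_2_precompute_lookup_powers : Prop := ∀ (n : Int), Dom_theorem_4_2_precompute_lookup_powers n → Spec_theorem_4_2_precompute_lookup_powers n (theorem_4_2_precompute_lookup_powers n)

-- ===== LEMMAS AND PROOFS =====

-- A's cell value at row p, column e
def pvCell (n L p e : Int) : Int :=
  if e > L ∨ p ^ e.toNat > n then 0 else p ^ e.toNat

lemma pvReplicate_eq_map (n : Int) (f : Int → Int) :
    ∀ (j : Int), (∀ e, j ≤ e → e < n → f e = 0) →
      List.replicate (n - j).toNat 0 = (PySem.List.pyRange j n 1).map f := by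
  intro j h
  by_cases hj : n ≤ j
  · rw [PySem.List.pyRange_one_eq_nil hj]
    have : (n - j).toNat = 0 := by omega
    simp [this]
  · push Not at hj
    have hlen : (n - j).toNat = (n - (j + 1)).toNat + 1 := by omega
    rw [PySem.List.pyRange_one_cons hj, hlen, List.map_cons, List.replicate_succ,
        pvReplicate_eq_map n f (j + 1) (fun e he => h e (by omega)), h j le_rfl hj]
termination_by j => (n - j).toNat
decreasing_by omega

lemma pvPow_mono {p : Int} (hp : 1 ≤ p) {a b : Nat} (hab : a ≤ b) : p ^ a ≤ p ^ b :=
  pow_le_pow_right₀ hp hab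

lemma pvRowAux_eq_map (n L p : Int) (hp : 1 ≤ p) (hLn : L < n) :
    ∀ (fuel : Nat) (j : Int), 0 ≤ j → L + 1 - j ≤ (fuel : Int) →
      pvRowAux n L p (p ^ j.toNat) j fuel = (PySem.List.pyRange j n 1).map (pvCell n L p) := by
  intro fuel
  induction fuel with
  | zero =>
    intro j hj hfuel
    simp only [pvRowAux]
    refine pvReplicate_eq_map n _ j (fun e he hen => ?_)
    have : e > L := by omega
    simp [pvCell, this]
  | succ fuel ih =>
    intro j hj hfuel
    simp only [pvRowAux]
    by_cases hc : j ≤ L ∧ p ^ j.toNat ≤ n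
    · rw [if_pos hc]
      have hjn : j < n := by omega
      rw [PySem.List.pyRange_one_cons hjn, List.map_cons]
      have hcell : pvCell n L p j = p ^ j.toNat := by
        simp [pvCell]
        omega
      have hpow : p ^ j.toNat * p = p ^ (j + 1).toNat := by
        have : (j + 1).toNat = j.toNat + 1 := by omega
        rw [this, pow_succ]
      rw [hcell, hpow, ih (j + 1) (by omega) (by omega)]
    · rw [if_neg hc]
      refine pvReplicate_eq_map n _ j (fun e he hen => ?_)
      by_cases hjL : j ≤ L
      · have hpj : p ^ j.toNat > n := by
          rcases not_and_or.mp hc with h | h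
          · exact absurd hjL h
          · omega
        have : p ^ e.toNat > n := lt_of_lt_of_le hpj (pvPow_mono hp (by omega))
        simp [pvCell, this]
      · have : e > L := by omega
        simp [pvCell, this]

-- ===== VERDICT =====
theorem theorem_4_2_precompute_lookup_powers_spec : Claim_equal_theorem_4_2_precompute_lookup_powers := by
  intro n _
  unfold Spec_theorem_4_2_precompute_lookup_powers
  unfold theorem_4_2_precompute_lookup_powers theorem_4_2_precompute_lookup_powers_alt
  by_cases hn : n < 1
  · rw [if_pos hn]
    have h1 : PySem.List.pyRange 1 (n + 1) 1 = [] := PySem.List.pyRange_one_eq_nil (by omega)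
    simp [h1]
  · rw [if_neg hn]
    push Not at hn
    rw [PySem.List.foldl_append_singleton_eq_map, List.nil_append]
    refine List.map_congr_left (fun p hp => ?_)
    rw [PySem.List.mem_pyRange_one] at hp
    rw [PySem.List.foldl_append_singleton_eq_map, List.nil_append]
    have hLn : (Nat.log 2 n.toNat : Int) < n := by
      have h1 := Nat.log_lt_self 2 (x := n.toNat) (by omega)
      omega
    have := pvRowAux_eq_map n (Nat.log 2 n.toNat : Int) p hp.1 hLn
      (Nat.log 2 n.toNat + 1) 0 le_rfl (by simp)
    simpa [pvCell] using this.symm
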